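-- pv_equiv track=rewrite | github.com/dk1ri/MYC_project | MYC_devices_hardware/MYCdevice_IC9700_python/misc_functions.py | ba_to_int
-- ===== SOURCE A (Python) =====
-- def ba_to_int(ba):
--     # bytearray to int
--     num = 0
--     i = len(ba) - 1
--     mul = 1
--     while i >= 0:
--         num += ba[i] * mul
--         i -= 1
--         mul *= 256
--     return num
-- ===== SOURCE B (Python) =====
-- def ba_to_int(ba):
--     # bytearray to int, Horner's method: forward pass, single accumulator
--     num = 0
--     for b in ba:
--         num = num * 256 + b
--     return num
-- ===== Notes on version B (the rewrite author's own statement) =====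
-- stated objective: simpler
-- what changed: Replaced the reverse index loop with a separate power-of-256 multiplier by a forward Horner fold with a single accumulator (num = num*256 + b).
import Mathlib
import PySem

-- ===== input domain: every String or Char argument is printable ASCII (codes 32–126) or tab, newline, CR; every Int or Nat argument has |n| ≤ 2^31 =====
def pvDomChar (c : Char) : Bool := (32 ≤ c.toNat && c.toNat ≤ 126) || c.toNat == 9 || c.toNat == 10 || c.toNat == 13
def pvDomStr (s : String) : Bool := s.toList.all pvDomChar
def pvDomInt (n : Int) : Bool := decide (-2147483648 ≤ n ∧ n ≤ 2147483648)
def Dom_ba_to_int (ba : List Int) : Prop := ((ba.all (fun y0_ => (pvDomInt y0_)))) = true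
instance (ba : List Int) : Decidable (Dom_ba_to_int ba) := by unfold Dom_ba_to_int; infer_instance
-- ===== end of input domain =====

-- B replaces A's reverse index loop with a multiplier by a forward Horner fold (num = num*256 + b); simpler, same O(n) cost.

-- ===== PORT A =====
-- while loop: state (num, i, mul); fuel = number of remaining iterations (i+1); ba[i] via pyGet?
-- (the loop only reads in-range indices, so the getD 0 default is never used)
def ba_to_int_go (ba : List Int) (num i mul : Int) : Nat → Int
  | 0 => num
  | f + 1 =>
    if i ≥ 0 then
      ba_to_int_go ba (num + (PySem.List.pyGet? ba i).getD 0 * mul) (i - 1) (mul * 256) f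
    else num

def ba_to_int (ba : List Int) : Int :=
  ba_to_int_go ba 0 ((ba.length : Int) - 1) 1 ba.length

-- ===== PORT B =====
def ba_to_int_alt (ba : List Int) : Int :=
  ba.foldl (fun num b => num * 256 + b) 0

-- ===== PRECONDITION & SPEC =====
def Spec_ba_to_int (ba : List Int) (out : Int) : Prop := out = ba_to_int_alt ba
instance (ba : List Int) (out : Int) : Decidable (Spec_ba_to_int ba out) := by unfold Spec_ba_to_int; infer_instance

-- ===== CLAIM (what is proved, stated in full; the proofs are below) =====
def Claim_equal_ba_to_int : Prop := ∀ (ba : List Int), Dom_ba_to_int ba → Spec_ba_to_int ba (ba_to_int ba)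

-- ===== LEMMAS AND PROOFS =====

-- Horner value of a prefix: the A-loop with fuel n and index n-1 adds H(take n) * mul to num.
theorem ba_to_int_go_eq (ba : List Int) (n : Nat) (hn : n ≤ ba.length) (num mul : Int) :
    ba_to_int_go ba num ((n : Int) - 1) mul n
      = num + ((ba.take n).foldl (fun a b => a * 256 + b) 0) * mul := by
  induction n generalizing num mul with
  | zero => simp [ba_to_int_go]
  | succ k ih =>
    have hk : k < ba.length := Nat.lt_of_succ_le hn
    have hge : ((k + 1 : Nat) : Int) - 1 ≥ 0 := by push_cast; omega
    have hcast : ((k + 1 : Nat) : Int) - 1 = (k : Nat) := by push_cast; ring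
    rw [ba_to_int_go, if_pos hge, hcast]
    have hget : PySem.List.pyGet? ba ((k : Nat) : Int) = some ba[k] := by
      rw [PySem.List.pyGet?_natCast]; exact List.getElem?_eq_getElem hk
    rw [ih (Nat.le_of_lt hk)]
    have htake : ba.take (k + 1) = ba.take k ++ [ba[k]] := by
      rw [List.take_add_one, List.getElem?_eq_getElem hk]; rfl
    rw [htake, List.foldl_append]
    simp [hget]; ring

-- ===== VERDICT (by name: the statement is the Claim_ definition above) =====
theorem ba_to_int_spec : Claim_equal_ba_to_int := by
  intro ba _
  unfold Spec_ba_to_int ba_to_int ba_to_int_alt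
  have := ba_to_int_go_eq ba ba.length (le_refl _) 0 1
  simpa using this
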